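-- pv_equiv track=rewrite | github.com/t2y/python-study | LanguageProcessing/100-knocks-2015/chapter1/05.py | char_bi_gram
-- ===== SOURCE A (Python) =====
-- def char_bi_gram(s):
--     length = len(s)
--     if length < 2:
--         yield s
--         return
--
--     for i, c in enumerate(s):
--         yield c + s[i + 1]
--         if i == length - 2:
--             break
-- ===== SOURCE B (Python) =====
-- def char_bi_gram(s):
--     # Traverse the string BACKWARDS carrying the previously seen (i.e. next)
--     # character, collect the bigrams back-to-front, then emit them reversed.
--     if len(s) < 2:
--         yield s
--         return
--     out = []
--     prev = s[-1]
--     for c in reversed(s[:-1]):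
--         out.append(c + prev)
--         prev = c
--     yield from reversed(out)
-- ===== Notes on version B (the rewrite author's own statement) =====
-- stated objective: alternative
-- what changed: replaces the forward enumerate-index-and-break loop (pairing c with s[i+1] by index) with a backward traversal that carries the previously seen character, builds the bigram list back-to-front, and emits it reversed; no index arithmetic, enumeration or break
import Mathlib
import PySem

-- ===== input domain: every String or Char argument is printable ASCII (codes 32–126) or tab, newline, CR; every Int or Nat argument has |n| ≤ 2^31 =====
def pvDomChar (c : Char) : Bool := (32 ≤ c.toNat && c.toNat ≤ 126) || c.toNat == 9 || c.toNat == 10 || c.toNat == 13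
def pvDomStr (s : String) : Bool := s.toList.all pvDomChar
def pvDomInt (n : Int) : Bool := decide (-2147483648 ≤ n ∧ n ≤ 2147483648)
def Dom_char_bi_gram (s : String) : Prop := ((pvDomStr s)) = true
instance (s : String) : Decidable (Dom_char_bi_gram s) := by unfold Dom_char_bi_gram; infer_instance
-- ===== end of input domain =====

-- B replaces A's forward enumerate-index-and-break loop with a backward traversal
-- carrying the previous character, building the bigrams back-to-front and reversing
-- at the end (alternative decomposition; same O(n) cost).


-- ===== PORT A =====
-- the 'for i, c in enumerate(s): yield c + s[i+1]; if i == length - 2: break' loop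
def charBiGramLoopA (cs : List Char) (length : Int) : List (Int × Char) → List String
  | [] => []
  | (i, c) :: rest =>
    match PySem.List.pyGet? cs (i + 1) with
    | some d =>
        String.ofList [c, d] ::
          (if i == length - 2 then [] else charBiGramLoopA cs length rest)
    | none => []  -- IndexError; unreachable: the break fires before the last index

def char_bi_gram (s : String) : List String :=
  let cs := s.toList
  let length : Int := cs.length
  if length < 2 then [s]
  else charBiGramLoopA cs length (PySem.List.enumerate cs 0)

-- ===== PORT B =====
-- the loop body 'out.append(c + prev); prev = c', state = (out, prev)
def charBiGramAltStep (st : List String × Char) (c : Char) : List String × Char :=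
  (st.1 ++ [String.ofList [c, st.2]], c)

def char_bi_gram_alt (s : String) : List String :=
  let cs := s.toList
  if cs.length < 2 then [s]
  else
    match PySem.List.pyGet? cs (-1) with        -- prev = s[-1]
    | some last =>
        -- 'for c in reversed(s[:-1]): …' then 'yield from reversed(out)'
        ((cs.dropLast.reverse).foldl charBiGramAltStep ([], last)).1.reverse
    | none => []                                 -- unreachable: len(s) ≥ 2

-- ===== PRECONDITION & SPEC =====
def Spec_char_bi_gram (s : String) (out : List String) : Prop := out = char_bi_gram_alt s
instance (s : String) (out : List String) : Decidable (Spec_char_bi_gram s out) := by unfold Spec_char_bi_gram; infer_instance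

-- ===== CLAIM (what is proved, stated in full; the proofs are below) =====
def Claim_equal_char_bi_gram : Prop := ∀ (s : String), Dom_char_bi_gram s → Spec_char_bi_gram s (char_bi_gram s)

-- ===== LEMMAS AND PROOFS =====

-- common reference value: the bigrams as a zip of cs with its tail
def pvZm (cs : List Char) : List String :=
  (cs.zip (cs.drop 1)).map (fun p => String.ofList [p.1, p.2])

theorem charBiGramLoopA_cons (cs : List Char) (n i : Int) (c : Char)
    (rest : List (Int × Char)) :
    charBiGramLoopA cs n ((i, c) :: rest) =
      match PySem.List.pyGet? cs (i + 1) with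
      | some d =>
          String.ofList [c, d] :: (if i == n - 2 then [] else charBiGramLoopA cs n rest)
      | none => [] := rfl

-- A's loop over a suffix of cs computes the zip-with-tail bigrams of that suffix
theorem charBiGramLoop_eq (cs : List Char) :
    ∀ (rest pre : List Char), cs = pre ++ rest → 2 ≤ rest.length →
      charBiGramLoopA cs (cs.length : Int) (PySem.List.enumerate rest (pre.length : Int))
        = pvZm rest := by
  intro rest
  induction rest with
  | nil => intro pre h hlen; simp at hlen
  | cons c rest' ih =>
    intro pre h hlen
    match rest', hlen with
    | d :: rest'', _ =>
      have hget : PySem.List.pyGet? cs ((pre.length : Int) + 1) = some d := by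
        have : cs = (pre ++ [c]) ++ d :: rest'' := by simp [h]
        rw [this]
        have := PySem.List.pyGet?_append_length (pre := pre ++ [c]) (y := d) (ys := rest'')
        simpa using this
      rw [PySem.List.enumerate_cons, charBiGramLoopA_cons, hget]
      have hcslen : (cs.length : Int) = (pre.length : Int) + 2 + rest''.length := by
        simp [h]; ring
      by_cases hend : rest'' = []
      · subst hend
        have heq : ((pre.length : Int) == (cs.length : Int) - 2) = true := by
          simp [hcslen]
        simp [heq, pvZm]
      · have hpos : 0 < rest''.length := List.length_pos_iff.mpr hend
        have hne : ((pre.length : Int) == (cs.length : Int) - 2) = false := by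
          simp [hcslen]; omega
        simp only [hne, Bool.false_eq_true, if_false]
        have hrec := ih (pre ++ [c]) (by simp [h]) (by simp; omega)
        have hlen' : ((pre ++ [c]).length : Int) = (pre.length : Int) + 1 := by simp
        rw [hlen'] at hrec
        rw [hrec]
        simp [pvZm]

-- B's backward fold collects the zip-with-tail bigrams reversed, carrying the head
theorem charBiGramFoldB (ys : List Char) (z : Char) (acc : List String) :
    (ys.reverse.foldl charBiGramAltStep (acc, z))
      = (acc ++ (pvZm (ys ++ [z])).reverse, (ys ++ [z]).headI) := by
  induction ys generalizing acc with
  | nil => simp [pvZm]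
  | cons a ys' ih =>
    have hstep : ∀ st c, charBiGramAltStep st c = (st.1 ++ [String.ofList [c, st.2]], c) :=
      fun _ _ => rfl
    rw [List.reverse_cons, List.foldl_append, ih]
    cases hys : ys' ++ [z] with
    | nil => simp at hys
    | cons r0 rs =>
      have hzm : pvZm (a :: r0 :: rs) = String.ofList [a, r0] :: pvZm (r0 :: rs) := by
        simp [pvZm]
      simp [hstep, hys, hzm]

-- ===== VERDICT (by name: the statement is the Claim_ definition above) =====
theorem char_bi_gram_spec : Claim_equal_char_bi_gram := by
  intro s _
  unfold Spec_char_bi_gram char_bi_gram char_bi_gram_alt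
  by_cases h : s.toList.length < 2
  · rw [if_pos (by exact_mod_cast h), if_pos h]
  · rw [if_neg (by exact_mod_cast h), if_neg h]
    have hne : s.toList ≠ [] := by
      intro hnil; rw [hnil] at h; simp at h
    have hget : PySem.List.pyGet? s.toList (-1) = some (s.toList.getLast hne) := by
      rw [PySem.List.pyGet?_neg_one, List.getLast?_eq_some_getLast hne]
    rw [hget]
    have hsplit : s.toList = s.toList.dropLast ++ [s.toList.getLast hne] :=
      (List.dropLast_append_getLast hne).symm
    have hA : charBiGramLoopA s.toList (s.toList.length : Int)
        (PySem.List.enumerate s.toList 0) = pvZm s.toList := by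
      simpa using charBiGramLoop_eq s.toList s.toList [] rfl (by omega)
    show charBiGramLoopA _ _ _ =
      ((s.toList.dropLast.reverse.foldl charBiGramAltStep ([], s.toList.getLast hne)).1).reverse
    rw [charBiGramFoldB, hA]
    simp only [List.nil_append, List.reverse_reverse]
    rw [← hsplit]
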